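-- pv_equiv track=rewrite | github.com/fqararyah/Fusing_DW_and_PW_on_GPUs | FusePlanner/utils.py | get_conv_layer_index_from_offset
-- ===== SOURCE A (Python) =====
-- def get_conv_layer_index_from_offset(model_dag, anchor_layer_index, layer_offset):
--
--     num_conv_layers = 0
--     layer_index = anchor_layer_index + 1
--     while num_conv_layers < layer_offset and layer_index < len(model_dag):
--         layer_specs = model_dag[layer_index]
--         if is_conv_layer(layer_specs):
--             num_conv_layers += 1
--
--         layer_index += 1
--
--     if num_conv_layers != layer_offset:
--         return -1
--
--     return layer_index - 1
--
-- def is_conv_layer(layer_specs):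
--     return 'type' in layer_specs and layer_specs['type'] in ['s', 'pw', 'dw']
-- ===== SOURCE B (Python) =====
-- def get_conv_layer_index_from_offset(model_dag, anchor_layer_index, layer_offset):
--     if layer_offset <= 0:
--         return anchor_layer_index if layer_offset == 0 else -1
--     conv_indices = [i for i in range(anchor_layer_index + 1, len(model_dag))
--                     if is_conv_layer(model_dag[i])]
--     if layer_offset > len(conv_indices):
--         return -1
--     return conv_indices[layer_offset - 1]
--
-- def is_conv_layer(layer_specs):
--     return 'type' in layer_specs and layer_specs['type'] in ['s', 'pw', 'dw']
-- ===== Notes on version B (the rewrite author's own statement) =====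
-- stated objective: alternative
-- what changed: Replaces A's count-and-stop while loop (mutable counter and cursor, post-loop check) with a two-phase gather-then-index: collect all conv-layer indices after the anchor in one pass, then pick the (layer_offset-1)-th, with the offset<=0 cases answered up front without scanning.
import Mathlib
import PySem

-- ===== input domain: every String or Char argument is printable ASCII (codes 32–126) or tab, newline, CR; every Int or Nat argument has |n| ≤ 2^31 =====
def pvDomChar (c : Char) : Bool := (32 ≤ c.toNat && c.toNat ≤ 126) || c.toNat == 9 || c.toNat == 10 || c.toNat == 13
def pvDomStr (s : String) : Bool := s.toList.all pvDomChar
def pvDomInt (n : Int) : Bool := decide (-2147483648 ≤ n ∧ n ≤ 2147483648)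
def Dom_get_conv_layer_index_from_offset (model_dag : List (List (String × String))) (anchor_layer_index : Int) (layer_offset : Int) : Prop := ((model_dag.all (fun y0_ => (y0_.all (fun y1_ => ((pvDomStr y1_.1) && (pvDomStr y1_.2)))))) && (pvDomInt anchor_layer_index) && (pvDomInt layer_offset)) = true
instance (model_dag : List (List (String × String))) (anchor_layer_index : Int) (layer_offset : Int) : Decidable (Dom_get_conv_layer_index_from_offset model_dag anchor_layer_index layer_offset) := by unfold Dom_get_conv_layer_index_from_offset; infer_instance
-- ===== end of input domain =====

-- B replaces A's count-and-stop while loop by a gather-then-index two-phase pass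
-- (collect all conv-layer indices after the anchor, then select by position);
-- objective: alternative decomposition, same O(n) cost.

-- ===== PORT A =====
-- is_conv_layer: 'type' in layer_specs and layer_specs['type'] in ['s','pw','dw']
-- shared by both ports: Source A and Source B carry this identical helper
def is_conv_layer (layer_specs : List (String × String)) : Bool :=
  match (PySem.Dict.mk layer_specs).get? "type" with
  | some v => v == "s" || v == "pw" || v == "dw"
  | none => false

-- A's while loop, state = (num_conv_layers, layer_index); the 'none' branch is
-- Python's IndexError (negative index below -len), excluded by Pre_.
def pyA_loop (model_dag : List (List (String × String))) (layer_offset : Int)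
    (num_conv_layers : Int) (layer_index : Int) : Int :=
  if h : num_conv_layers < layer_offset ∧ layer_index < (model_dag.length : Int) then
    match PySem.List.pyGet? model_dag layer_index with
    | none => -1   -- IndexError in Python; outside Pre_
    | some layer_specs =>
        pyA_loop model_dag layer_offset
          (if is_conv_layer layer_specs then num_conv_layers + 1 else num_conv_layers)
          (layer_index + 1)
  else if num_conv_layers ≠ layer_offset then -1 else layer_index - 1
termination_by ((model_dag.length : Int) - layer_index).toNat
decreasing_by omega

def get_conv_layer_index_from_offset (model_dag : List (List (String × String))) (anchor_layer_index : Int) (layer_offset : Int) : Int :=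
  pyA_loop model_dag layer_offset 0 (anchor_layer_index + 1)

-- ===== PORT B =====
-- gather-then-index; in the comprehension a 'none' from pyGet? (IndexError in
-- Python, outside Pre_) is dropped; the final pyGet? is guarded in range.
def get_conv_layer_index_from_offset_alt (model_dag : List (List (String × String))) (anchor_layer_index : Int) (layer_offset : Int) : Int :=
  if layer_offset ≤ 0 then
    (if layer_offset == 0 then anchor_layer_index else -1)
  else
    let conv_indices :=
      (PySem.List.pyRange (anchor_layer_index + 1) (model_dag.length : Int) 1).filter
        (fun i => match PySem.List.pyGet? model_dag i with
                  | some s => is_conv_layer s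
                  | none => false)
    if layer_offset > (conv_indices.length : Int) then -1
    else match PySem.List.pyGet? conv_indices (layer_offset - 1) with
         | some v => v
         | none => -1

-- ===== PRECONDITION & SPEC =====
-- Pre_ excludes exactly the inputs where Python A raises IndexError (and B raises
-- it too): layer_offset ≥ 1 with a scan starting below -len(model_dag).
def Pre_get_conv_layer_index_from_offset (model_dag : List (List (String × String))) (anchor_layer_index : Int) (layer_offset : Int) : Prop :=
  1 ≤ layer_offset → -(model_dag.length : Int) ≤ anchor_layer_index + 1
instance (model_dag : List (List (String × String))) (anchor_layer_index : Int) (layer_offset : Int) : Decidable (Pre_get_conv_layer_index_from_offset model_dag anchor_layer_index layer_offset) := by unfold Pre_get_conv_layer_index_from_offset; infer_instance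

def pvWitness_get_conv_layer_index_from_offset : (List (List (String × String))) × Int × Int :=
  ([[("type", "pw")], [("type", "fc")], [("type", "s")]], 0, 1)

def Spec_get_conv_layer_index_from_offset (model_dag : List (List (String × String))) (anchor_layer_index : Int) (layer_offset : Int) (out : Int) : Prop := out = get_conv_layer_index_from_offset_alt model_dag anchor_layer_index layer_offset
instance (model_dag : List (List (String × String))) (anchor_layer_index : Int) (layer_offset : Int) (out : Int) : Decidable (Spec_get_conv_layer_index_from_offset model_dag anchor_layer_index layer_offset out) := by unfold Spec_get_conv_layer_index_from_offset; infer_instance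

-- ===== CLAIM (what is proved, stated in full; the proofs are below) =====
def Claim_equal_get_conv_layer_index_from_offset : Prop := ∀ (model_dag : List (List (String × String))) (anchor_layer_index : Int) (layer_offset : Int), Dom_get_conv_layer_index_from_offset model_dag anchor_layer_index layer_offset → Pre_get_conv_layer_index_from_offset model_dag anchor_layer_index layer_offset → Spec_get_conv_layer_index_from_offset model_dag anchor_layer_index layer_offset (get_conv_layer_index_from_offset model_dag anchor_layer_index layer_offset)

-- ===== LEMMAS AND PROOFS =====

-- the filter predicate of B
def convPred (model_dag : List (List (String × String))) (i : Int) : Bool :=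
  match PySem.List.pyGet? model_dag i with
  | some s => is_conv_layer s
  | none => false

-- select-by-position part of B
def selB (l : List Int) (k : Int) : Int :=
  if k > (l.length : Int) then -1
  else match PySem.List.pyGet? l (k - 1) with
       | some v => v
       | none => -1

lemma selB_cons_one (x : Int) (l : List Int) : selB (x :: l) 1 = x := by
  unfold selB
  rw [if_neg (by simp)]
  have h0 : (1 : Int) - 1 = 0 := by norm_num
  rw [h0, PySem.List.pyGet?_zero_cons]

lemma selB_cons_ge_two (x : Int) (l : List Int) (k : Int) (hk : 2 ≤ k) :
    selB (x :: l) k = selB l (k - 1) := by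
  unfold selB
  have h1 : (k - 1 : Int).toNat = (k - 2).toNat + 1 := by omega
  by_cases hlen : k > ((x :: l).length : Int)
  · simp only [hlen, if_pos]
    have : k - 1 > (l.length : Int) := by simp at hlen; omega
    rw [if_pos this]
  · rw [if_neg hlen]
    have : ¬ (k - 1 > (l.length : Int)) := by simp at hlen; omega
    rw [if_neg this]
    have e1 : PySem.List.pyGet? (x :: l) (k - 1) = (x :: l)[(k - 1).toNat]? :=
      PySem.List.pyGet?_of_nonneg _ (by omega)
    have e2 : PySem.List.pyGet? l (k - 1 - 1) = l[(k - 1 - 1).toNat]? :=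
      PySem.List.pyGet?_of_nonneg _ (by omega)
    have h2 : (k - 1 - 1 : Int).toNat = (k - 2).toNat := by omega
    rw [e1, e2, h1, h2, List.getElem?_cons_succ]

-- A's loop, still counting (num < layer_offset), equals gather-then-index from idx on.
lemma loop_eq_gather (model_dag : List (List (String × String))) (layer_offset : Int) :
    ∀ (n : Nat) (num idx : Int),
      (((model_dag.length : Int) - idx).toNat = n) →
      num < layer_offset →
      -(model_dag.length : Int) ≤ idx →
      pyA_loop model_dag layer_offset num idx =
        selB ((PySem.List.pyRange idx (model_dag.length : Int) 1).filter (convPred model_dag))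
          (layer_offset - num) := by
  intro n
  induction n with
  | zero =>
      intro num idx hn hnum _
      have hge : (model_dag.length : Int) ≤ idx := by omega
      rw [pyA_loop, dif_neg (by omega), if_pos (show num ≠ layer_offset by omega)]
      rw [PySem.List.pyRange_one_eq_nil hge]
      simp only [List.filter_nil]
      unfold selB
      rw [if_pos (by simp; omega)]
  | succ m ih =>
      intro num idx hn hnum hlo
      have hlt : idx < (model_dag.length : Int) := by omega
      obtain ⟨s, hs⟩ : ∃ s, PySem.List.pyGet? model_dag idx = some s := by
        rcases h : PySem.List.pyGet? model_dag idx with _ | s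
        · exfalso
          rw [PySem.List.pyGet?_eq_none_iff] at h
          exact h ⟨hlo, hlt⟩
        · exact ⟨s, rfl⟩
      rw [pyA_loop]
      rw [dif_pos ⟨hnum, hlt⟩, hs]
      dsimp only
      rw [PySem.List.pyRange_one_cons hlt]
      have hpred : convPred model_dag idx = is_conv_layer s := by
        simp [convPred, hs]
      rw [List.filter_cons, hpred]
      by_cases hc : is_conv_layer s = true
      · rw [if_pos hc, hc, if_pos rfl]
        by_cases hdone : num + 1 < layer_offset
        · rw [ih (num + 1) (idx + 1) (by omega) hdone (by omega)]
          rw [selB_cons_ge_two _ _ _ (by omega)]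
          congr 1
          omega
        · have heq : num + 1 = layer_offset := by omega
          rw [pyA_loop, dif_neg (by omega),
              if_neg (show ¬ (num + 1 ≠ layer_offset) by omega)]
          have : layer_offset - num = 1 := by omega
          rw [this, selB_cons_one]
          omega
      · simp only [hc, Bool.false_eq_true, if_false]
        exact ih num (idx + 1) (by omega) hnum (by omega)

-- ===== VERDICT (by name: the statement is the Claim_ definition above) =====
theorem get_conv_layer_index_from_offset_spec : Claim_equal_get_conv_layer_index_from_offset := by
  intro model_dag anchor_layer_index layer_offset _ hpre
  unfold Spec_get_conv_layer_index_from_offset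
  unfold get_conv_layer_index_from_offset get_conv_layer_index_from_offset_alt
  by_cases hoff : layer_offset ≤ 0
  · rw [pyA_loop, dif_neg (by omega), if_pos hoff]
    by_cases h0 : layer_offset = 0
    · subst h0
      simp
    · rw [if_pos (show (0 : Int) ≠ layer_offset by omega)]
      simp [h0]
  · rw [if_neg hoff]
    have hlo : -(model_dag.length : Int) ≤ anchor_layer_index + 1 :=
      hpre (by omega)
    rw [loop_eq_gather model_dag layer_offset
          (((model_dag.length : Int) - (anchor_layer_index + 1)).toNat)
          0 (anchor_layer_index + 1) rfl (by omega) hlo]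
    unfold selB convPred
    simp only [Int.sub_zero]
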